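-- pv_equiv track=rewrite | github.com/wherby/code | algorithm/array/subarray-logTrick/LogTrick和其他写法/smallest-subarrays-with-maximum-bitwise-or/原地修改数字.py | smallestSubarrays
-- ===== SOURCE A (Python) =====
-- from typing import List, Tuple, Optional
--
-- def smallestSubarrays(nums: List[int]) -> List[int]:
--     ans = [1] * len(nums)  # 子数组的长度至少是 1
--     for i, x in enumerate(nums):  # 计算右端点为 i 的子数组的或值
--         for j in range(i - 1, -1, -1):
--             if (nums[j] | x) == nums[j]:  # nums[j] 及其左边元素无法增大
--                 break
--             nums[j] |= x  # nums[j] 增大，现在 nums[j] = 原数组 nums[j] 到 nums[i] 的或值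
--             ans[j] = i - j + 1  # nums[j] 最后一次增大时的子数组长度就是答案
--     return ans
-- ===== SOURCE B (Python) =====
-- from typing import List
--
-- def smallestSubarrays(nums: List[int]) -> List[int]:
--     # Alternative algorithm: iterate right-to-left keeping `ors`, the distinct
--     # values of OR(nums[i..r]) paired with the minimal r achieving each value
--     # (at most O(bit-width) entries).  ans[i] is read off the last entry.
--     # Mutates nums in place to the suffix-OR values, matching A's side effect.
--     n = len(nums)
--     ans = [1] * n
--     ors = []  # [(v, r)]: v = OR(nums[i..r]), r minimal for v, increasing r
--     for i in range(n - 1, -1, -1):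
--         x = nums[i]
--         new = [(x, i)]
--         for v, r in ors:
--             w = x | v
--             if w != new[-1][0]:
--                 new.append((w, r))
--         ors = new
--         ans[i] = ors[-1][1] - i + 1
--         nums[i] = ors[-1][0]
--     return ans
-- ===== Notes on version B (the rewrite author's own statement) =====
-- stated objective: alternative
-- what changed: Replaces A's forward pass with in-place backward OR-absorption into all earlier elements (nested loop with break) by a right-to-left pass that maintains the short list of distinct suffix-OR values paired with the minimal index achieving each, reading each answer off the last entry.
import Mathlib
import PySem

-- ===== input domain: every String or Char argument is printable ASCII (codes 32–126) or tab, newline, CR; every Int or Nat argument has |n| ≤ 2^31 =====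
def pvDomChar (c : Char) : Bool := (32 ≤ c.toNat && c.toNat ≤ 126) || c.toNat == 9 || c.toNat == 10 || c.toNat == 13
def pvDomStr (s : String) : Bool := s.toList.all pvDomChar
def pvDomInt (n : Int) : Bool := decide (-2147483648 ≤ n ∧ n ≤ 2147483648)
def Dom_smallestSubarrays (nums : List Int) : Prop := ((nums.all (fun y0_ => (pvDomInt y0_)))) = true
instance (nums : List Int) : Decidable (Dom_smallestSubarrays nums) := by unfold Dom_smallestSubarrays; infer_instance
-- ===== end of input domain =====

-- B is an alternative algorithm of similar cost: a right-to-left pass keeping the distinct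
-- suffix-OR values with the minimal index achieving each; A mutates its argument in place,
-- B's Python performs the same mutation, and the equivalence proved is about the RETURN value only.

-- ===== PORT A =====
-- inner loop 'for j in range(i-1, -1, -1)' with break; argument k runs j = k-1, k-2, …, 0.
-- All list indices A touches are in range, so getD 0 is exact here.
def innerA (x : Int) (i : Nat) : Nat → List Int → List Int → List Int × List Int
  | 0, nums, ans => (nums, ans)
  | j+1, nums, ans =>
    let nj := nums.getD j 0
    if PySem.Int.bor nj x = nj then (nums, ans)
    else innerA x i j (nums.set j (PySem.Int.bor nj x))
           (ans.set j ((i : Int) - (j : Int) + 1))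

def smallestSubarrays (nums : List Int) : List Int :=
  ((List.range nums.length).foldl
    (fun st i => innerA (st.1.getD i 0) i i st.1 st.2)
    (nums, List.replicate nums.length (1 : Int))).2

-- ===== PORT B =====
-- Source B's inner loop 'for v, r in ors: w = x | v; if w != new[-1][0]: new.append((w, r))':
-- `prev` carries new[-1][0]; the output list is built front-to-back by the recursion.
def innerB (x : Int) (prev : Int) : List (Int × Nat) → List (Int × Nat)
  | [] => []
  | (v, r) :: rest =>
    let w := PySem.Int.bor x v
    if w = prev then innerB x prev rest
    else (w, r) :: innerB x w rest

-- outer loop 'for i in range(n-1, -1, -1)'; argument m counts processed indices,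
-- the current index is i = n-1-m; ans is built by prepending (entry for the current i first).
def loopB (nums : List Int) : Nat → List (Int × Nat) × List Int
  | 0 => ([], [])
  | m+1 =>
    let st := loopB nums m
    let i := nums.length - 1 - m
    let x := nums.getD i 0
    let newOrs := (x, i) :: innerB x x st.1
    let last := newOrs.getLastD (0, 0)
    (newOrs, ((last.2 : Int) - (i : Int) + 1) :: st.2)

def smallestSubarrays_alt (nums : List Int) : List Int := (loopB nums nums.length).2

-- ===== PRECONDITION & SPEC =====
def Spec_smallestSubarrays (nums : List Int) (out : List Int) : Prop := out = smallestSubarrays_alt nums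
instance (nums : List Int) (out : List Int) : Decidable (Spec_smallestSubarrays nums out) := by unfold Spec_smallestSubarrays; infer_instance

-- ===== CLAIM (what is proved, stated in full; the proofs are below) =====
def Claim_equal_smallestSubarrays : Prop := ∀ (nums : List Int), Dom_smallestSubarrays nums → Spec_smallestSubarrays nums (smallestSubarrays nums)

-- ===== LEMMAS AND PROOFS =====

-- ---- bitwise-OR algebra for PySem.Int.bor (assoc / idempotence via testBit) ----

theorem pv_sub_land (n : Nat) : ∀ m : Nat, n - (n &&& m) = n.ldiff m := by
  induction n using Nat.binaryRec with
  | zero =>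
    intro m
    have h0 : Nat.ldiff 0 m = 0 := Nat.eq_of_testBit_eq (by simp [Nat.testBit_ldiff])
    simp [h0]
  | bit b n ih =>
    intro m
    induction m using Nat.binaryRec with
    | zero =>
      have h0 : (Nat.bit b n).ldiff 0 = Nat.bit b n := Nat.eq_of_testBit_eq (by simp [Nat.testBit_ldiff])
      simp [h0]
    | bit c m _ =>
      rw [Nat.land_bit, Nat.ldiff_bit]
      have h1 : n &&& m ≤ n := Nat.and_le_left
      have h2 := ih m
      cases b <;> cases c <;> simp [Nat.bit_val] <;> omega

theorem pv_testBit_negSucc (m : Nat) (k : Nat) : (Int.negSucc m).testBit k = !(m.testBit k) := rfl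
theorem pv_testBit_ofNat (m : Nat) (k : Nat) : (Int.ofNat m).testBit k = m.testBit k := rfl

theorem pv_int_ext (a b : Int) (h : ∀ k, a.testBit k = b.testBit k) : a = b := by
  cases a with
  | ofNat m =>
    cases b with
    | ofNat n =>
      have : m = n := Nat.eq_of_testBit_eq (fun k => by have := h k; simpa using this)
      simp [this]
    | negSucc n =>
      exfalso
      have hk := h (m + n)
      rw [pv_testBit_ofNat, pv_testBit_negSucc] at hk
      rw [Nat.testBit_eq_false_of_lt, Nat.testBit_eq_false_of_lt] at hk
      · simp at hk
      · calc n < 2 ^ n := Nat.lt_two_pow_self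
          _ ≤ 2 ^ (m + n) := Nat.pow_le_pow_right (by norm_num) (by omega)
      · calc m < 2 ^ m := Nat.lt_two_pow_self
          _ ≤ 2 ^ (m + n) := Nat.pow_le_pow_right (by norm_num) (by omega)
  | negSucc m =>
    cases b with
    | ofNat n =>
      exfalso
      have hk := h (m + n)
      rw [pv_testBit_ofNat, pv_testBit_negSucc] at hk
      rw [Nat.testBit_eq_false_of_lt, Nat.testBit_eq_false_of_lt] at hk
      · simp at hk
      · calc n < 2 ^ n := Nat.lt_two_pow_self
          _ ≤ 2 ^ (m + n) := Nat.pow_le_pow_right (by norm_num) (by omega)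
      · calc m < 2 ^ m := Nat.lt_two_pow_self
          _ ≤ 2 ^ (m + n) := Nat.pow_le_pow_right (by norm_num) (by omega)
    | negSucc n =>
      have : m = n := Nat.eq_of_testBit_eq (fun k => by
        have := h k; rw [pv_testBit_negSucc, pv_testBit_negSucc] at this; simpa using this)
      simp [this]

theorem pv_neg_repr (b : Int) (h : ¬ 0 ≤ b) : b = Int.negSucc ((-b - 1).toNat) := by
  rw [Int.negSucc_eq]; omega

theorem pv_nonneg_repr (b : Int) (h : 0 ≤ b) : b = Int.ofNat b.toNat := by
  simp [Int.ofNat_toNat]; omega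

theorem pv_testBit_bor (a b : Int) (k : Nat) :
    (PySem.Int.bor a b).testBit k = (a.testBit k || b.testBit k) := by
  unfold PySem.Int.bor
  by_cases ha : 0 ≤ a <;> by_cases hb : 0 ≤ b <;> simp only [ha, hb, if_true, if_false]
  · conv_rhs => rw [pv_nonneg_repr a ha, pv_nonneg_repr b hb]
    rw [pv_testBit_ofNat, pv_testBit_ofNat]
    show (Int.ofNat _).testBit k = _
    rw [pv_testBit_ofNat, Nat.testBit_lor]
  · conv_rhs => rw [pv_nonneg_repr a ha, pv_neg_repr b hb]
    rw [pv_testBit_ofNat, pv_testBit_negSucc]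
    have : (-(((-b - 1).toNat - ((-b - 1).toNat &&& a.toNat) : Nat) : Int) - 1)
        = Int.negSucc ((-b - 1).toNat - ((-b - 1).toNat &&& a.toNat)) := by
      rw [Int.negSucc_eq]; ring
    rw [this, pv_testBit_negSucc, pv_sub_land, Nat.testBit_ldiff]
    cases a.toNat.testBit k <;> cases ((-b - 1).toNat).testBit k <;> rfl
  · conv_rhs => rw [pv_neg_repr a ha, pv_nonneg_repr b hb]
    rw [pv_testBit_ofNat, pv_testBit_negSucc]
    have : (-(((-a - 1).toNat - ((-a - 1).toNat &&& b.toNat) : Nat) : Int) - 1)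
        = Int.negSucc ((-a - 1).toNat - ((-a - 1).toNat &&& b.toNat)) := by
      rw [Int.negSucc_eq]; ring
    rw [this, pv_testBit_negSucc, pv_sub_land, Nat.testBit_ldiff]
    cases b.toNat.testBit k <;> cases ((-a - 1).toNat).testBit k <;> rfl
  · conv_rhs => rw [pv_neg_repr a ha, pv_neg_repr b hb]
    rw [pv_testBit_negSucc, pv_testBit_negSucc]
    have : (-((((-a - 1).toNat &&& (-b - 1).toNat) : Nat) : Int) - 1)
        = Int.negSucc ((-a - 1).toNat &&& (-b - 1).toNat) := by
      rw [Int.negSucc_eq]; ring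
    rw [this, pv_testBit_negSucc, Nat.testBit_land]
    cases ((-a - 1).toNat).testBit k <;> cases ((-b - 1).toNat).testBit k <;> rfl

theorem pv_bor_assoc (a b c : Int) :
    PySem.Int.bor (PySem.Int.bor a b) c = PySem.Int.bor a (PySem.Int.bor b c) := by
  apply pv_int_ext; intro k
  simp [pv_testBit_bor, Bool.or_assoc]

theorem pv_bor_self (a : Int) : PySem.Int.bor a a = a := by
  apply pv_int_ext; intro k
  simp [pv_testBit_bor]

theorem pv_zero_bor (a : Int) : PySem.Int.bor 0 a = a := by
  rw [PySem.Int.bor_comm]; exact PySem.Int.bor_zero a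

-- ---- OR of a window of ns: orLen ns j k = OR of ns[j..j+k-1] (0 for k = 0) ----

def orLen (ns : List Int) (j : Nat) : Nat → Int
  | 0 => 0
  | k+1 => PySem.Int.bor (orLen ns j k) (ns.getD (j+k) 0)

theorem orLen_split (ns : List Int) (j a : Nat) :
    ∀ b : Nat, orLen ns j (a + b) = PySem.Int.bor (orLen ns j a) (orLen ns (j + a) b) := by
  intro b
  induction b with
  | zero => simp [orLen, PySem.Int.bor_zero]
  | succ b ih =>
    show orLen ns j (a + b + 1) = _
    rw [orLen, ih, orLen, pv_bor_assoc, Nat.add_assoc]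

theorem orLen_absorb (ns : List Int) (j : Nat) {a b : Nat} (h : a ≤ b) :
    PySem.Int.bor (orLen ns j a) (orLen ns j b) = orLen ns j b := by
  obtain ⟨c, rfl⟩ := Nat.exists_eq_add_of_le h
  rw [orLen_split ns j a c, ← pv_bor_assoc, pv_bor_self]

theorem orLen_sandwich (ns : List Int) (j : Nat) {a b c : Nat} (hab : a ≤ b) (hbc : b ≤ c)
    (h : orLen ns j a = orLen ns j c) : orLen ns j b = orLen ns j a := by
  have h1 := orLen_absorb ns j hab
  have h2 := orLen_absorb ns j hbc
  rw [h] at h1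
  rw [PySem.Int.bor_comm] at h1
  rw [h1] at h2
  rw [h2]; exact h.symm

-- step: extend the window on the right by one element
theorem orLen_step (ns : List Int) {j i : Nat} (h : j ≤ i) :
    orLen ns j (i + 1 - j) = PySem.Int.bor (orLen ns j (i - j)) (ns.getD i 0) := by
  have h1 : i + 1 - j = (i - j) + 1 := by omega
  have h2 : j + (i - j) = i := by omega
  rw [h1, orLen, h2]

-- absorption is monotone in the left endpoint
theorem orLen_mono_absorb (ns : List Int) {j' j i : Nat} (h1 : j' ≤ j) (h2 : j ≤ i)
    (h : orLen ns j (i + 1 - j) = orLen ns j (i - j)) :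
    orLen ns j' (i + 1 - j') = orLen ns j' (i - j') := by
  have e1 : i - j' = (j - j') + (i - j) := by omega
  have e2 : i + 1 - j' = (j - j') + (i + 1 - j) := by omega
  have e3 : j' + (j - j') = j := by omega
  rw [e1, e2, orLen_split, orLen_split, e3, h]

-- ---- getD/set helpers ----

theorem pv_getD_set_ne {l : List Int} {k j : Nat} {a d : Int} (h : k ≠ j) :
    (l.set k a).getD j d = l.getD j d := by
  simp [List.getD_eq_getElem?_getD, h]

theorem pv_getD_set_self {l : List Int} {k : Nat} {a d : Int} (h : k < l.length) :
    (l.set k a).getD k d = a := by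
  simp [List.getD_eq_getElem?_getD, h]

-- ---- characterisation of A's result ----

-- v encodes the least r in [j, i) with OR(ns[j..r]) = OR(ns[j..i-1])
def LeastA (ns : List Int) (j i : Nat) (v : Int) : Prop :=
  ∃ r : Nat, v = (r : Int) - (j : Int) + 1 ∧ j ≤ r ∧ r < i ∧
    orLen ns j (r + 1 - j) = orLen ns j (i - j) ∧
    ∀ r', j ≤ r' → r' < r → orLen ns j (r' + 1 - j) ≠ orLen ns j (i - j)

def InvA (ns : List Int) (i : Nat) (st : List Int × List Int) : Prop :=
  st.1.length = ns.length ∧ st.2.length = ns.length ∧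
  (∀ j, i ≤ j → st.1.getD j 0 = ns.getD j 0) ∧
  (∀ j, j < i → st.1.getD j 0 = orLen ns j (i - j)) ∧
  (∀ j, i ≤ j → j < ns.length → st.2.getD j 0 = 1) ∧
  (∀ j, j < i → LeastA ns j i (st.2.getD j 0))

theorem innerA_spec (ns : List Int) (i : Nat) (hi : i < ns.length) :
    ∀ k nums ans, k ≤ i →
    nums.length = ns.length → ans.length = ns.length →
    (∀ j, j < k → nums.getD j 0 = orLen ns j (i - j)) →
    ((innerA (ns.getD i 0) i k nums ans).1.length = ns.length ∧
     (innerA (ns.getD i 0) i k nums ans).2.length = ns.length ∧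
     (∀ j, (innerA (ns.getD i 0) i k nums ans).1.getD j 0 =
        if j < k ∧ ¬ (orLen ns j (i + 1 - j) = orLen ns j (i - j)) then
          PySem.Int.bor (nums.getD j 0) (ns.getD i 0) else nums.getD j 0) ∧
     (∀ j, (innerA (ns.getD i 0) i k nums ans).2.getD j 0 =
        if j < k ∧ ¬ (orLen ns j (i + 1 - j) = orLen ns j (i - j)) then
          (i : Int) - (j : Int) + 1 else ans.getD j 0)) := by
  intro k
  induction k with
  | zero =>
    intro nums ans _ h1 h2 _
    refine ⟨h1, h2, fun j => ?_, fun j => ?_⟩ <;> simp [innerA]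
  | succ k ih =>
    intro nums ans hk h1 h2 hvals
    have hki : k ≤ i := by omega
    have hnj : nums.getD k 0 = orLen ns k (i - k) := hvals k (by omega)
    have hstep : orLen ns k (i + 1 - k) = PySem.Int.bor (orLen ns k (i - k)) (ns.getD i 0) :=
      orLen_step ns hki
    by_cases hc : PySem.Int.bor (nums.getD k 0) (ns.getD i 0) = nums.getD k 0
    · -- break: everything to the left absorbs as well
      have habsk : orLen ns k (i + 1 - k) = orLen ns k (i - k) := by
        rw [hstep, ← hnj, hc, hnj]
      have habs : ∀ j, j ≤ k → orLen ns j (i + 1 - j) = orLen ns j (i - j) := by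
        intro j hj; exact orLen_mono_absorb ns hj hki habsk
      have hres : innerA (ns.getD i 0) i (k + 1) nums ans = (nums, ans) := by
        show (if PySem.Int.bor (nums.getD k 0) (ns.getD i 0) = nums.getD k 0 then (nums, ans)
          else innerA (ns.getD i 0) i k (nums.set k (PySem.Int.bor (nums.getD k 0) (ns.getD i 0)))
            (ans.set k ((i : Int) - (k : Int) + 1))) = (nums, ans)
        rw [if_pos hc]
      rw [hres]
      refine ⟨h1, h2, fun j => ?_, fun j => ?_⟩ <;>
      · by_cases hjk : j < k + 1
        · simp [hjk, habs j (by omega)]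
        · simp [hjk]
    · have hres : innerA (ns.getD i 0) i (k + 1) nums ans =
          innerA (ns.getD i 0) i k (nums.set k (PySem.Int.bor (nums.getD k 0) (ns.getD i 0)))
            (ans.set k ((i : Int) - (k : Int) + 1)) := by
        show (if PySem.Int.bor (nums.getD k 0) (ns.getD i 0) = nums.getD k 0 then (nums, ans)
          else innerA (ns.getD i 0) i k (nums.set k (PySem.Int.bor (nums.getD k 0) (ns.getD i 0)))
            (ans.set k ((i : Int) - (k : Int) + 1))) = _
        rw [if_neg hc]
      have hkn : k < nums.length := by omega
      have hkn2 : k < ans.length := by omega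
      have habsk : ¬ (orLen ns k (i + 1 - k) = orLen ns k (i - k)) := by
        rw [hstep, ← hnj]; intro he; exact hc (by rw [he])
      obtain ⟨l1, l2, e1, e2⟩ := ih (nums.set k (PySem.Int.bor (nums.getD k 0) (ns.getD i 0)))
        (ans.set k ((i : Int) - (k : Int) + 1)) hki
        (by rw [List.length_set]; exact h1) (by rw [List.length_set]; exact h2)
        (fun j hj => by rw [pv_getD_set_ne (by omega)]; exact hvals j (by omega))
      rw [hres]
      refine ⟨l1, l2, fun j => ?_, fun j => ?_⟩
      · rw [e1 j]
        rcases Nat.lt_trichotomy j k with hj | hj | hj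
        · rw [pv_getD_set_ne (show k ≠ j by omega)]
          by_cases ha : orLen ns j (i + 1 - j) = orLen ns j (i - j)
          · rw [if_neg (by rintro ⟨_, hq⟩; exact hq ha), if_neg (by rintro ⟨_, hq⟩; exact hq ha)]
          · rw [if_pos ⟨hj, ha⟩, if_pos ⟨by omega, ha⟩]
        · subst hj
          rw [if_neg (by rintro ⟨hq, _⟩; omega), pv_getD_set_self hkn,
            if_pos ⟨Nat.lt_succ_self j, habsk⟩]
        · rw [pv_getD_set_ne (show k ≠ j by omega), if_neg (by rintro ⟨hq, _⟩; omega),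
            if_neg (by rintro ⟨hq, _⟩; omega)]
      · rw [e2 j]
        rcases Nat.lt_trichotomy j k with hj | hj | hj
        · rw [pv_getD_set_ne (show k ≠ j by omega)]
          by_cases ha : orLen ns j (i + 1 - j) = orLen ns j (i - j)
          · rw [if_neg (by rintro ⟨_, hq⟩; exact hq ha), if_neg (by rintro ⟨_, hq⟩; exact hq ha)]
          · rw [if_pos ⟨hj, ha⟩, if_pos ⟨by omega, ha⟩]
        · subst hj
          rw [if_neg (by rintro ⟨hq, _⟩; omega), pv_getD_set_self hkn2,
            if_pos ⟨Nat.lt_succ_self j, habsk⟩]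
        · rw [pv_getD_set_ne (show k ≠ j by omega), if_neg (by rintro ⟨hq, _⟩; omega),
            if_neg (by rintro ⟨hq, _⟩; omega)]

theorem stepA (ns : List Int) (i : Nat) (hi : i < ns.length) (st : List Int × List Int)
    (h : InvA ns i st) :
    InvA ns (i + 1) (innerA (st.1.getD i 0) i i st.1 st.2) := by
  obtain ⟨hl1, hl2, hup, hlow, hones, hleast⟩ := h
  have hx : st.1.getD i 0 = ns.getD i 0 := hup i le_rfl
  rw [hx]
  obtain ⟨l1, l2, e1, e2⟩ := innerA_spec ns i hi i st.1 st.2 le_rfl hl1 hl2 hlow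
  refine ⟨l1, l2, fun j hj => ?_, fun j hj => ?_, fun j hj hjn => ?_, fun j hj => ?_⟩
  · rw [e1 j, if_neg (by rintro ⟨hq, _⟩; omega)]
    exact hup j (by omega)
  · rw [e1 j]
    rcases Nat.lt_trichotomy j i with hji | hji | hji
    · by_cases ha : orLen ns j (i + 1 - j) = orLen ns j (i - j)
      · rw [if_neg (by rintro ⟨_, hq⟩; exact hq ha), hlow j hji, ha]
      · rw [if_pos ⟨hji, ha⟩, hlow j hji, ← orLen_step ns (Nat.le_of_lt hji)]
    · subst hji
      rw [if_neg (by rintro ⟨hq, _⟩; omega), hup j le_rfl]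
      have h1 : j + 1 - j = 1 := by omega
      rw [h1]
      show ns.getD j 0 = PySem.Int.bor (orLen ns j 0) (ns.getD (j + 0) 0)
      simp [orLen, pv_zero_bor]
    · omega
  · rw [e2 j, if_neg (by rintro ⟨hq, _⟩; omega)]
    exact hones j (by omega) hjn
  · rw [e2 j]
    rcases Nat.lt_trichotomy j i with hji | hji | hji
    · by_cases ha : orLen ns j (i + 1 - j) = orLen ns j (i - j)
      · rw [if_neg (by rintro ⟨_, hq⟩; exact hq ha)]
        obtain ⟨r, hv, hjr, hri, heq, hmin⟩ := hleast j hji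
        exact ⟨r, hv, hjr, by omega, by rw [ha, heq], fun r' hr1 hr2 => by
          rw [ha]; exact hmin r' hr1 hr2⟩
      · rw [if_pos ⟨hji, ha⟩]
        refine ⟨i, rfl, Nat.le_of_lt hji, by omega, rfl, fun r' hr1 hr2 => ?_⟩
        intro heq
        have hb : orLen ns j (i - j) = orLen ns j (r' + 1 - j) :=
          orLen_sandwich ns j (by omega) (by omega) heq
        exact ha (by rw [← heq, ← hb])
    · subst hji
      rw [if_neg (by rintro ⟨hq, _⟩; omega), hones j le_rfl hi]
      exact ⟨j, by ring, le_rfl, by omega, rfl, fun r' hr1 hr2 => by omega⟩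
    · omega

def foldA (ns : List Int) (i : Nat) : List Int × List Int :=
  (List.range i).foldl (fun st i' => innerA (st.1.getD i' 0) i' i' st.1 st.2)
    (ns, List.replicate ns.length (1 : Int))

theorem foldA_inv (ns : List Int) : ∀ i, i ≤ ns.length → InvA ns i (foldA ns i) := by
  intro i
  induction i with
  | zero =>
    intro _
    refine ⟨rfl, List.length_replicate, fun j _ => rfl, fun j hj => by omega,
      fun j _ hjn => List.getD_replicate 1 hjn, fun j hj => by omega⟩
  | succ i ih =>
    intro hi
    have hstep : foldA ns (i + 1) =
        innerA ((foldA ns i).1.getD i 0) i i (foldA ns i).1 (foldA ns i).2 := by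
      unfold foldA
      rw [List.range_succ, List.foldl_concat]
    rw [hstep]
    exact stepA ns i (by omega) (foldA ns i) (ih (by omega))

-- ---- characterisation of B's pieces ----

-- chain of (v, r) pairs with v = OR(ns[i1..r]): values valid, links record that the
-- OR is constant up to the next recorded index, the last entry closes at ns.length
def FwdChain (ns : List Int) (i1 : Nat) : List (Int × Nat) → Prop
  | [] => True
  | (v, r) :: rest =>
    v = orLen ns i1 (r + 1 - i1) ∧ r < ns.length ∧ i1 ≤ r ∧
    (match rest with
     | [] => v = orLen ns i1 (ns.length - i1)
     | (_, r') :: _ => v = orLen ns i1 (r' - i1)) ∧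
    FwdChain ns i1 rest

-- the part of the level-i0 chain built after value `prev`: each entry is a strict
-- increase recorded at its minimal index, and the last value closes at ns.length
def ChainFrom (ns : List Int) (i0 : Nat) : Int → List (Int × Nat) → Prop
  | prev, [] => prev = orLen ns i0 (ns.length - i0)
  | prev, (v, r) :: rest =>
    v = orLen ns i0 (r + 1 - i0) ∧ i0 < r ∧ r < ns.length ∧
    prev = orLen ns i0 (r - i0) ∧ v ≠ prev ∧
    ChainFrom ns i0 v rest

def lastP (p : Int × Nat) : List (Int × Nat) → Int × Nat
  | [] => p
  | q :: t => lastP q t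

theorem getLastD_eq_lastP (l : List (Int × Nat)) : ∀ p d, (p :: l).getLastD d = lastP p l := by
  induction l with
  | nil => intro p d; rfl
  | cons q t ih => intro p d; rw [List.getLastD_cons]; exact ih q p

theorem orLen_one (ns : List Int) (j : Nat) : orLen ns j 1 = ns.getD j 0 := by
  show PySem.Int.bor (orLen ns j 0) (ns.getD (j + 0) 0) = ns.getD j 0
  simp [orLen, pv_zero_bor]

-- prepending index i0: the OR over ns[i0..] splits off x = ns[i0]
theorem orLen_cons_split (ns : List Int) {i0 r : Nat} (h : i0 < r) :
    orLen ns i0 (r - i0) = PySem.Int.bor (ns.getD i0 0) (orLen ns (i0 + 1) (r - (i0 + 1))) := by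
  have h1 : r - i0 = 1 + (r - (i0 + 1)) := by omega
  rw [h1, orLen_split ns i0 1 (r - (i0 + 1)), orLen_one]

-- the running value prev is the OR of ns[i0..] up to (exclusive) the next recorded index
def PrevOK (ns : List Int) (i0 : Nat) (prev : Int) : List (Int × Nat) → Prop
  | [] => prev = orLen ns i0 (ns.length - i0)
  | (_, r1) :: _ => prev = orLen ns i0 (r1 - i0)

theorem innerB_spec (ns : List Int) (i0 : Nat) :
    ∀ (ors : List (Int × Nat)) (prev : Int), FwdChain ns (i0 + 1) ors →
    PrevOK ns i0 prev ors →
    ChainFrom ns i0 prev (innerB (ns.getD i0 0) prev ors) := by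
  intro ors
  induction ors with
  | nil =>
    intro prev _ hprev
    show prev = orLen ns i0 (ns.length - i0)
    exact hprev
  | cons p rest ih =>
    obtain ⟨v1, r1⟩ := p
    intro prev hch hprev
    obtain ⟨hval, hrn, hir, hlink, hrest⟩ := hch
    have hir0 : i0 < r1 := by omega
    have hw : PySem.Int.bor (ns.getD i0 0) v1 = orLen ns i0 (r1 + 1 - i0) := by
      have h1 : orLen ns i0 (r1 + 1 - i0) =
          PySem.Int.bor (ns.getD i0 0) (orLen ns (i0 + 1) (r1 + 1 - (i0 + 1))) :=
        orLen_cons_split ns (by omega)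
      rw [h1, ← hval]
    have hnext : PrevOK ns i0 (PySem.Int.bor (ns.getD i0 0) v1) rest := by
      cases rest with
      | nil =>
        show PySem.Int.bor (ns.getD i0 0) v1 = orLen ns i0 (ns.length - i0)
        have hl : v1 = orLen ns (i0 + 1) (ns.length - (i0 + 1)) := hlink
        have h1 : orLen ns i0 (ns.length - i0) =
            PySem.Int.bor (ns.getD i0 0) (orLen ns (i0 + 1) (ns.length - (i0 + 1))) :=
          orLen_cons_split ns (by omega)
        rw [h1, ← hl]
      | cons q rest' =>
        obtain ⟨v2, r2⟩ := q
        show PySem.Int.bor (ns.getD i0 0) v1 = orLen ns i0 (r2 - i0)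
        have hl : v1 = orLen ns (i0 + 1) (r2 - (i0 + 1)) := hlink
        have hi0r2 : i0 + 1 ≤ r2 := by
          obtain ⟨_, _, h2, _, _⟩ := hrest
          exact h2
        have h1 : orLen ns i0 (r2 - i0) =
            PySem.Int.bor (ns.getD i0 0) (orLen ns (i0 + 1) (r2 - (i0 + 1))) :=
          orLen_cons_split ns (by omega)
        rw [h1, ← hl]
    show ChainFrom ns i0 prev
      (if PySem.Int.bor (ns.getD i0 0) v1 = prev then innerB (ns.getD i0 0) prev rest
       else (PySem.Int.bor (ns.getD i0 0) v1, r1) :: innerB (ns.getD i0 0) (PySem.Int.bor (ns.getD i0 0) v1) rest)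
    by_cases hc : PySem.Int.bor (ns.getD i0 0) v1 = prev
    · rw [if_pos hc]
      refine ih prev hrest ?_
      cases rest with
      | nil =>
        show prev = orLen ns i0 (ns.length - i0)
        have hn : PySem.Int.bor (ns.getD i0 0) v1 = orLen ns i0 (ns.length - i0) := hnext
        exact hc.symm.trans hn
      | cons q rest' =>
        obtain ⟨v2, r2⟩ := q
        show prev = orLen ns i0 (r2 - i0)
        have hn : PySem.Int.bor (ns.getD i0 0) v1 = orLen ns i0 (r2 - i0) := hnext
        exact hc.symm.trans hn
    · rw [if_neg hc]
      have hp : prev = orLen ns i0 (r1 - i0) := hprev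
      exact ⟨hw, hir0, hrn, hp, hc, ih (PySem.Int.bor (ns.getD i0 0) v1) hrest hnext⟩

theorem chainFrom_fwd (ns : List Int) (i0 : Nat) :
    ∀ (out : List (Int × Nat)) (prev : Int) (r0 : Nat), ChainFrom ns i0 prev out →
    prev = orLen ns i0 (r0 + 1 - i0) → r0 < ns.length → i0 ≤ r0 →
    FwdChain ns i0 ((prev, r0) :: out) := by
  intro out
  induction out with
  | nil =>
    intro prev r0 hcf hval hrn hir
    exact ⟨hval, hrn, hir, hcf, trivial⟩
  | cons p rest ih =>
    obtain ⟨v, r⟩ := p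
    intro prev r0 hcf hval hrn hir
    obtain ⟨h1, h2, h3, h4, h5, h6⟩ := hcf
    exact ⟨hval, hrn, hir, h4, ih v r h6 h1 h3 (by omega)⟩

theorem chain_last (ns : List Int) (i0 : Nat) :
    ∀ (out : List (Int × Nat)) (prev : Int) (r0 : Nat), ChainFrom ns i0 prev out →
    prev = orLen ns i0 (r0 + 1 - i0) → i0 ≤ r0 → r0 < ns.length →
    (∀ s, i0 ≤ s → s < r0 → orLen ns i0 (s + 1 - i0) ≠ orLen ns i0 (ns.length - i0)) →
    (i0 ≤ (lastP (prev, r0) out).2 ∧ (lastP (prev, r0) out).2 < ns.length ∧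
     orLen ns i0 ((lastP (prev, r0) out).2 + 1 - i0) = orLen ns i0 (ns.length - i0) ∧
     ∀ s, i0 ≤ s → s < (lastP (prev, r0) out).2 →
       orLen ns i0 (s + 1 - i0) ≠ orLen ns i0 (ns.length - i0)) := by
  intro out
  induction out with
  | nil =>
    intro prev r0 hcf hval hir hrn hmin
    have hc : prev = orLen ns i0 (ns.length - i0) := hcf
    refine ⟨hir, hrn, ?_, hmin⟩
    show orLen ns i0 (r0 + 1 - i0) = orLen ns i0 (ns.length - i0)
    rw [← hval, hc]
  | cons p rest ih =>
    obtain ⟨v, r⟩ := p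
    intro prev r0 hcf hval hir hrn hmin
    obtain ⟨h1, h2, h3, h4, h5, h6⟩ := hcf
    show i0 ≤ (lastP (v, r) rest).2 ∧ _
    refine ih v r h6 h1 (by omega) h3 ?_
    intro s hs1 hs2 heqS
    -- if the OR at s already equals the final OR, then by the sandwich lemma the value
    -- at r - 1 (= prev) equals the value at r (= v), contradicting v ≠ prev
    have hSr : orLen ns i0 (r + 1 - i0) = orLen ns i0 (ns.length - i0) → False := by
      intro hvS
      have hb : orLen ns i0 (r - i0) = orLen ns i0 (s + 1 - i0) :=
        orLen_sandwich ns i0 (by omega) (by omega) (heqS.trans hvS.symm)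
      exact h5 (by rw [← h1] at hvS; rw [h4, hb, heqS, ← hvS, h1])
    -- value at s equals final OR; value at n-1 is the final OR; r lies between
    have hb2 : orLen ns i0 (r + 1 - i0) = orLen ns i0 (ns.length - i0) := by
      have := orLen_sandwich ns i0 (show s + 1 - i0 ≤ r + 1 - i0 by omega)
        (show r + 1 - i0 ≤ ns.length - i0 by omega) heqS
      rw [this, heqS]
    exact hSr hb2

-- loop invariant for B: after m steps the chain describes suffixes starting at n - m,
-- and the answers for indices n - m … n - 1 are already in place
def InvB (ns : List Int) (m : Nat) (st : List (Int × Nat) × List Int) : Prop :=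
  FwdChain ns (ns.length - m) st.1 ∧
  (m = 0 → st.1 = []) ∧
  (0 < m → ∃ v tail, st.1 = (v, ns.length - m) :: tail) ∧
  st.2.length = m ∧
  (∀ q, q < m → LeastA ns (ns.length - m + q) ns.length (st.2.getD q 0))

theorem loopB_inv (ns : List Int) : ∀ m, m ≤ ns.length → InvB ns m (loopB ns m) := by
  intro m
  induction m with
  | zero =>
    intro _
    exact ⟨trivial, fun _ => rfl, fun h0 => absurd h0 (by omega), rfl, fun q hq => by omega⟩
  | succ m ih =>
    intro hm
    obtain ⟨hch, hnil, hanchor, hlen, hans⟩ := ih (by omega)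
    have hi0 : ns.length - 1 - m = ns.length - (m + 1) := by omega
    set i0 := ns.length - 1 - m with hi0def
    have hi1 : ns.length - m = i0 + 1 := by omega
    have hi0n : i0 < ns.length := by omega
    rw [hi1] at hch hanchor
    -- initial prev for the inner loop
    have hprev0 : PrevOK ns i0 (ns.getD i0 0) (loopB ns m).1 := by
      by_cases hm0 : m = 0
      · rw [hnil hm0]
        show ns.getD i0 0 = orLen ns i0 (ns.length - i0)
        have he1 : ns.length - i0 = 1 := by omega
        rw [he1, orLen_one]
      · obtain ⟨v, tail, he⟩ := hanchor (by omega)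
        rw [he]
        show ns.getD i0 0 = orLen ns i0 (i0 + 1 - i0)
        have he1 : i0 + 1 - i0 = 1 := by omega
        rw [he1, orLen_one]
    have hcf : ChainFrom ns i0 (ns.getD i0 0)
        (innerB (ns.getD i0 0) (ns.getD i0 0) (loopB ns m).1) :=
      innerB_spec ns i0 (loopB ns m).1 (ns.getD i0 0) hch hprev0
    have hx1 : ns.getD i0 0 = orLen ns i0 (i0 + 1 - i0) := by
      have : i0 + 1 - i0 = 1 := by omega
      rw [this, orLen_one]
    obtain ⟨q1, q2, q3, q4⟩ := chain_last ns i0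
      (innerB (ns.getD i0 0) (ns.getD i0 0) (loopB ns m).1) (ns.getD i0 0) i0 hcf hx1
      le_rfl hi0n (fun s hs1 hs2 => by omega)
    have hstep : loopB ns (m + 1) =
        ((ns.getD i0 0, i0) :: innerB (ns.getD i0 0) (ns.getD i0 0) (loopB ns m).1,
         (((((ns.getD i0 0, i0) :: innerB (ns.getD i0 0) (ns.getD i0 0) (loopB ns m).1).getLastD
             (0, 0)).2 : Int) - (i0 : Int) + 1) :: (loopB ns m).2) := rfl
    rw [hstep]
    have hlastP : (((ns.getD i0 0, i0) :: innerB (ns.getD i0 0) (ns.getD i0 0) (loopB ns m).1).getLastD (0, 0))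
        = lastP (ns.getD i0 0, i0) (innerB (ns.getD i0 0) (ns.getD i0 0) (loopB ns m).1) :=
      getLastD_eq_lastP _ _ _
    refine ⟨?_, by omega, ?_, ?_, ?_⟩
    · have : ns.length - (m + 1) = i0 := by omega
      rw [this]
      exact chainFrom_fwd ns i0 _ _ i0 hcf hx1 hi0n le_rfl
    · intro _
      exact ⟨ns.getD i0 0, _, by rw [show ns.length - (m + 1) = i0 from by omega]⟩
    · simp [hlen]
    · intro q hq
      cases q with
      | zero =>
        rw [List.getD_cons_zero, hlastP,
          show ns.length - (m + 1) + 0 = i0 from by omega]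
        exact ⟨(lastP (ns.getD i0 0, i0) (innerB (ns.getD i0 0) (ns.getD i0 0) (loopB ns m).1)).2,
          rfl, q1, q2, q3, fun r' h1 h2 => q4 r' h1 h2⟩
      | succ q =>
        rw [List.getD_cons_succ]
        have := hans q (by omega)
        rw [show ns.length - (m + 1) + (q + 1) = ns.length - m + q from by omega]
        exact this

theorem LeastA_unique (ns : List Int) (j i : Nat) (v1 v2 : Int)
    (h1 : LeastA ns j i v1) (h2 : LeastA ns j i v2) : v1 = v2 := by
  obtain ⟨r1, hv1, hj1, hi1, he1, hm1⟩ := h1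
  obtain ⟨r2, hv2, hj2, hi2, he2, hm2⟩ := h2
  have : r1 = r2 := by
    rcases Nat.lt_trichotomy r1 r2 with h | h | h
    · exact absurd he1 (hm2 r1 hj1 h)
    · exact h
    · exact absurd he2 (hm1 r2 hj2 h)
  rw [hv1, hv2, this]

-- ===== VERDICT (by name: the statement is the Claim_ definition above) =====
theorem smallestSubarrays_spec : Claim_equal_smallestSubarrays := by
  intro ns _
  unfold Spec_smallestSubarrays
  have hA : smallestSubarrays ns = (foldA ns ns.length).2 := rfl
  obtain ⟨hl1, hl2, _, _, _, hleastA⟩ := foldA_inv ns ns.length le_rfl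
  obtain ⟨_, _, _, hlenB, hleastB⟩ := loopB_inv ns ns.length le_rfl
  have hB : smallestSubarrays_alt ns = (loopB ns ns.length).2 := rfl
  apply List.ext_getElem
  · rw [hA, hB, hl2, hlenB]
  · intro j hj1 hj2
    have hjn : j < ns.length := by rw [hA, hl2] at hj1; exact hj1
    have hgetA : (smallestSubarrays ns)[j] = (foldA ns ns.length).2.getD j 0 := by
      rw [← List.getD_eq_getElem (smallestSubarrays ns) 0 hj1, hA]
    have hgetB : (smallestSubarrays_alt ns)[j] = (loopB ns ns.length).2.getD j 0 := by
      rw [← List.getD_eq_getElem (smallestSubarrays_alt ns) 0 hj2, hB]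
    rw [hgetA, hgetB]
    have h1 := hleastA j hjn
    have h2 := hleastB j hjn
    rw [show ns.length - ns.length + j = j from by omega] at h2
    exact LeastA_unique ns j ns.length _ _ h1 h2
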